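-- pv_equiv track=rewrite | github.com/MrBrantCode/unitest_baseline | mut_generate/mist_train_taco/taco_5951/solution.py | reduce_string_by_price
-- ===== SOURCE A (Python) =====
-- def reduce_string_by_price(w: str, p: int) -> str:
--     """
--     Reduces the string `w` by removing the minimal number of letters such that the sum of the indices
--     of the remaining letters (price) is less than or equal to `p`.
--
--     Parameters:
--     - w (str): The input string consisting of lowercase Latin letters.
--     - p (int): The price threshold.
--
--     Returns:
--     - str: The modified string after removing the necessary letters.
--     """
--     # Calculate the price of the string `w`
--     price = sum(ord(char) - 96 for char in w)
--
--     # If the initial price is already within the threshold, return the original string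
--     if price <= p:
--         return w
--
--     # Sort the characters of the string by their price (index)
--     sorted_chars = sorted(w, key=lambda char: ord(char), reverse=True)
--
--     # Remove characters starting from the highest price until the price is within the threshold
--     for char in sorted_chars:
--         price -= (ord(char) - 96)
--         w = w.replace(char, '', 1)
--         if price <= p:
--             break
--
--     return w
-- ===== SOURCE B (Python) =====
-- def reduce_string_by_price(w: str, p: int) -> str:
--     """Same result as A, but O(n + k log k): count letters by value, decide how many
--     of each distinct letter to remove greedily top-down (closed-form ceil division
--     instead of one-by-one removal), then rebuild the string in a single pass that
--     skips the leftmost occurrences of each removed letter."""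
--     price = sum(ord(c) - 96 for c in w)
--     if price <= p:
--         return w
--     cnt = {}
--     for c in w:
--         cnt[c] = cnt.get(c, 0) + 1
--     rem = {}
--     for d in sorted(cnt, reverse=True):
--         if price <= p:
--             break
--         v = ord(d) - 96
--         n = cnt[d]
--         if v > 0:
--             need = (price - p + v - 1) // v
--             take = need if need < n else n
--         else:
--             take = n
--         rem[d] = take
--         price -= take * v
--     out = []
--     for c in w:
--         r = rem.get(c, 0)
--         if r > 0:
--             rem[c] = r - 1
--         else:
--             out.append(c)
--     return ''.join(out)
-- ===== Notes on version B (the rewrite author's own statement) =====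
-- stated objective: faster
-- what changed: Replaces the O(n^2) one-character-at-a-time loop (sorted string + repeated str.replace) with counting occurrences per distinct character, a greedy top-down pass that computes the number of removals per character in closed form by ceiling division, and a single rebuild pass skipping the leftmost removed occurrences.
import Mathlib
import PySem

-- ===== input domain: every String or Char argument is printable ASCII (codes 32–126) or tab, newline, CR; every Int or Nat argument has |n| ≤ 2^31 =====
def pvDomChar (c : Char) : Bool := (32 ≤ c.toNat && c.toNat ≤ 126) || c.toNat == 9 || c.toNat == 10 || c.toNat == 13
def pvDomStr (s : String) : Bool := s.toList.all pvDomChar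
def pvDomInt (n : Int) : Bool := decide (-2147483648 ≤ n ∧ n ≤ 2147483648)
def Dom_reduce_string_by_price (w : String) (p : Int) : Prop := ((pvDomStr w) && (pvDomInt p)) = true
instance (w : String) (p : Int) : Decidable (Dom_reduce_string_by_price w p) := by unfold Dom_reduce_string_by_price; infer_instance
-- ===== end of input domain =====

-- B replaces A's quadratic sorted-string + repeated str.replace loop by per-letter counts,
-- a greedy closed-form (ceiling-division) removal count per distinct letter, and one rebuild pass.

-- ===== PORT A =====
-- exact port of w.replace(c, '', 1) for a single character c: removes the first occurrence (no-op if absent)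
def pvRemoveFirst (c : Char) : List Char → List Char
  | [] => []
  | x :: t => if x = c then t else x :: pvRemoveFirst c t

-- A's for-loop over sorted_chars with early break, state (price, w)
def pvLoopA (p : Int) : List Char → Int → List Char → List Char
  | [], _, wl => wl
  | c :: rest, price, wl =>
    let price' := price - ((c.toNat : Int) - 96)
    let wl' := pvRemoveFirst c wl
    if price' ≤ p then wl' else pvLoopA p rest price' wl'

def reduce_string_by_price (w : String) (p : Int) : String :=
  let price := (w.toList.map (fun c => (c.toNat : Int) - 96)).sum
  if price ≤ p then w
  else String.ofList (pvLoopA p (PySem.List.sorted w.toList (fun c => c.toNat) true) price w.toList)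

-- ===== PORT B =====
-- B's greedy loop over the distinct letters in descending order, building the removal dict `rem`
def pvLoopB (p : Int) (cnt : PySem.Dict Char Int) : List Char → Int → PySem.Dict Char Int → PySem.Dict Char Int
  | [], _, rem => rem
  | d :: ds, price, rem =>
    if price ≤ p then rem
    else
      let v : Int := (d.toNat : Int) - 96
      let n := cnt.getD d 0
      let take :=
        if 0 < v then
          let need := PySem.Int.floordiv (price - p + v - 1) v
          if need < n then need else n
        else n
      pvLoopB p cnt ds (price - take * v) (rem.insert d take)

def reduce_string_by_price_alt (w : String) (p : Int) : String :=
  let price := (w.toList.map (fun c => (c.toNat : Int) - 96)).sum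
  if price ≤ p then w
  else
    let cnt := w.toList.foldl (fun d x => d.insert x (d.getD x 0 + 1)) PySem.Dict.empty
    let rem := pvLoopB p cnt (PySem.List.sorted cnt.keys (fun c => c) true) price PySem.Dict.empty
    let out := w.toList.foldl
      (fun (st : PySem.Dict Char Int × List Char) c =>
        let r := st.1.getD c 0
        if 0 < r then (st.1.insert c (r - 1), st.2) else (st.1, st.2 ++ [c]))
      (rem, [])
    String.ofList out.2

-- ===== PRECONDITION & SPEC =====
def Spec_reduce_string_by_price (w : String) (p : Int) (out : String) : Prop := out = reduce_string_by_price_alt w p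
instance (w : String) (p : Int) (out : String) : Decidable (Spec_reduce_string_by_price w p out) := by unfold Spec_reduce_string_by_price; infer_instance

-- ===== CLAIM (what is proved, stated in full; the proofs are below) =====
def Claim_equal_reduce_string_by_price : Prop := ∀ (w : String) (p : Int), Dom_reduce_string_by_price w p → Spec_reduce_string_by_price w p (reduce_string_by_price w p)

-- ===== LEMMAS AND PROOFS =====

-- value of a letter
def pvVal (c : Char) : Int := (c.toNat : Int) - 96

-- remove, for every character c, the first (f c) occurrences, in one left-to-right pass
def pvSem (f : Char → Nat) : List Char → List Char
  | [] => []
  | x :: xs => if 0 < f x then pvSem (Function.update f x (f x - 1)) xs else x :: pvSem f xs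

-- remove the first t occurrences of c
def pvRemoveN (c : Char) : Nat → List Char → List Char
  | 0, wl => wl
  | t + 1, wl => pvRemoveN c t (pvRemoveFirst c wl)

-- ceiling of (price - p) / v, as B computes it
def pvNeed (p price v : Int) : Int := PySem.Int.floordiv (price - p + v - 1) v

-- function-level version of B's greedy loop: how many of each character get removed
def pvGreedy (p : Int) (wl : List Char) : List Char → Int → (Char → Nat) → (Char → Nat)
  | [], _, f => f
  | d :: ds, price, f =>
    if price ≤ p then f
    else
      let t := if 0 < pvVal d then min (wl.count d) (pvNeed p price (pvVal d)).toNat else wl.count d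
      pvGreedy p wl ds (price - (t : Int) * pvVal d) (Function.update f d t)

lemma pvSem_zero (wl : List Char) : pvSem (fun _ => 0) wl = wl := by
  induction wl with
  | nil => rfl
  | cons x xs ih => simp [pvSem, ih]

lemma pvRemoveFirst_sem (c : Char) (wl : List Char) : ∀ f : Char → Nat,
    pvRemoveFirst c (pvSem f wl) = pvSem (Function.update f c (f c + 1)) wl := by
  induction wl with
  | nil => intro f; rfl
  | cons x xs ih =>
    intro f
    by_cases hx : x = c
    · subst hx
      have h2 : pvSem (Function.update f x (f x + 1)) (x :: xs) = pvSem f xs := by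
        simp [pvSem, Function.update_idem, Function.update_eq_self]
      rw [h2]
      by_cases hf : 0 < f x
      · have h1 : pvSem f (x :: xs) = pvSem (Function.update f x (f x - 1)) xs := by
          simp [pvSem, hf]
        rw [h1, ih]
        simp only [Function.update_self, Function.update_idem]
        have hfx : f x - 1 + 1 = f x := by omega
        rw [hfx, Function.update_eq_self]
      · have h1 : pvSem f (x :: xs) = x :: pvSem f xs := by simp [pvSem, hf]
        rw [h1]
        simp [pvRemoveFirst]
    · have hcx : c ≠ x := fun hh => hx hh.symm
      have hval : Function.update f c (f c + 1) x = f x := Function.update_of_ne hx _ _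
      by_cases hf : 0 < f x
      · have h1 : pvSem f (x :: xs) = pvSem (Function.update f x (f x - 1)) xs := by
          simp [pvSem, hf]
        have h2 : pvSem (Function.update f c (f c + 1)) (x :: xs)
            = pvSem (Function.update (Function.update f c (f c + 1)) x (f x - 1)) xs := by
          simp [pvSem, hval, hf]
        have key : Function.update (Function.update f c (f c + 1)) x (f x - 1)
            = Function.update (Function.update f x (f x - 1)) c
                (Function.update f x (f x - 1) c + 1) := by
          rw [Function.update_of_ne hcx, Function.update_comm hcx]
        rw [h1, ih, h2, key]
      · have h1 : pvSem f (x :: xs) = x :: pvSem f xs := by simp [pvSem, hf]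
        have h2 : pvSem (Function.update f c (f c + 1)) (x :: xs)
            = x :: pvSem (Function.update f c (f c + 1)) xs := by
          simp [pvSem, hval, hf]
        rw [h1, h2, ← ih]
        simp [pvRemoveFirst, hx]

lemma pvRemoveN_sem (c : Char) (wl : List Char) : ∀ (t : Nat) (f : Char → Nat),
    pvRemoveN c t (pvSem f wl) = pvSem (Function.update f c (f c + t)) wl := by
  intro t
  induction t with
  | zero => intro f; simp [pvRemoveN, Function.update_eq_self]
  | succ t ih =>
    intro f
    simp only [pvRemoveN]
    rw [pvRemoveFirst_sem, ih]
    simp only [Function.update_idem, Function.update_self]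
    have h2 : f c + 1 + t = f c + (t + 1) := by omega
    rw [h2]

lemma pvNeed_le_iff {p price v : Int} (hv : 0 < v) (k : Int) :
    pvNeed p price v ≤ k ↔ price - k * v ≤ p := by
  unfold pvNeed
  constructor
  · intro h
    by_contra hc
    have h2 : k + 1 ≤ PySem.Int.floordiv (price - p + v - 1) v :=
      (PySem.Int.le_floordiv_iff_mul_le hv).mpr (by nlinarith)
    omega
  · intro h
    by_contra hc
    have h2 : k + 1 ≤ PySem.Int.floordiv (price - p + v - 1) v := by omega
    have h3 := (PySem.Int.le_floordiv_iff_mul_le hv).mp h2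
    nlinarith

lemma pvNeed_pos {p price v : Int} (hv : 0 < v) (hp : p < price) : 1 ≤ pvNeed p price v := by
  unfold pvNeed
  exact (PySem.Int.le_floordiv_iff_mul_le hv).mpr (by nlinarith)

lemma pvNeed_shift {p price v : Int} (hv : 0 < v) :
    pvNeed p (price - v) v = pvNeed p price v - 1 := by
  unfold pvNeed
  rw [PySem.Int.floordiv_eq_ediv_of_pos hv, PySem.Int.floordiv_eq_ediv_of_pos hv]
  have h : price - p + v - 1 = (price - v - p + v - 1) + 1 * v := by ring
  rw [h, Int.add_mul_ediv_right _ _ (by omega : v ≠ 0)]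
  omega

-- per-group behaviour of A's loop on a block of equal characters
lemma pvLoopA_replicate (p : Int) (d : Char) (rest : List Char) : ∀ (n : Nat) (price : Int) (wl : List Char),
    p < price →
    pvLoopA p (List.replicate n d ++ rest) price wl =
      if 0 < pvVal d ∧ (pvNeed p price (pvVal d)).toNat ≤ n
      then pvRemoveN d (pvNeed p price (pvVal d)).toNat wl
      else pvLoopA p rest (price - n * pvVal d) (pvRemoveN d n wl) := by
  intro n
  induction n with
  | zero =>
    intro price wl hp
    rw [if_neg]
    · simp [pvRemoveN]
    · rintro ⟨hv, hle⟩
      have := pvNeed_pos hv hp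
      omega
  | succ n ih =>
    intro price wl hp
    have hstep : pvLoopA p (List.replicate (n + 1) d ++ rest) price wl
        = (if price - pvVal d ≤ p then pvRemoveFirst d wl
           else pvLoopA p (List.replicate n d ++ rest) (price - pvVal d) (pvRemoveFirst d wl)) := by
      simp [List.replicate_succ, pvLoopA, pvVal]
    rw [hstep]
    by_cases hbr : price - pvVal d ≤ p
    · rw [if_pos hbr]
      have hv : 0 < pvVal d := by omega
      have hneed1 : pvNeed p price (pvVal d) = 1 := by
        have hle : pvNeed p price (pvVal d) ≤ 1 := (pvNeed_le_iff hv 1).mpr (by omega)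
        have := pvNeed_pos hv hp
        omega
      rw [if_pos ⟨hv, by rw [hneed1]; omega⟩, hneed1]
      simp [pvRemoveN]
    · rw [if_neg hbr]
      have hp' : p < price - pvVal d := by omega
      rw [ih (price - pvVal d) (pvRemoveFirst d wl) hp']
      by_cases hv : 0 < pvVal d
      · have hsh := pvNeed_shift (p := p) (price := price) hv
        have hpos := pvNeed_pos hv hp
        have hge2 : 2 ≤ pvNeed p price (pvVal d) := by
          by_contra hc
          have h1 : pvNeed p price (pvVal d) ≤ 1 := by omega
          exact hbr (by have := (pvNeed_le_iff hv 1).mp h1; omega)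
        by_cases hc : (pvNeed p (price - pvVal d) (pvVal d)).toNat ≤ n
        · rw [if_pos ⟨hv, hc⟩, if_pos ⟨hv, by rw [hsh] at hc; omega⟩]
          have ht : (pvNeed p price (pvVal d)).toNat
              = (pvNeed p (price - pvVal d) (pvVal d)).toNat + 1 := by rw [hsh]; omega
          rw [ht]
          rfl
        · rw [if_neg (by rintro ⟨_, h⟩; exact hc h),
              if_neg (by rintro ⟨_, h⟩; apply hc; rw [hsh]; omega)]
          have harith : price - pvVal d - (n : Int) * pvVal d
              = price - ((n + 1 : Nat) : Int) * pvVal d := by push_cast; ring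
          rw [harith]
          rfl
      · rw [if_neg (by rintro ⟨h, _⟩; exact hv h), if_neg (by rintro ⟨h, _⟩; exact hv h)]
        have harith : price - pvVal d - (n : Int) * pvVal d
            = price - ((n + 1 : Nat) : Int) * pvVal d := by push_cast; ring
        rw [harith]
        rfl

lemma pvGreedy_of_le (p : Int) (wl ds : List Char) (price : Int) (f : Char → Nat)
    (h : price ≤ p) : pvGreedy p wl ds price f = f := by
  cases ds with
  | nil => rfl
  | cons d ds => simp [pvGreedy, h]

-- master lemma: A's loop over the grouped sorted list computes exactly B's greedy removal plan
lemma pvMaster (p : Int) (wl : List Char) : ∀ (ds : List Char) (price : Int) (f : Char → Nat),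
    p < price → ds.Nodup → (∀ d ∈ ds, f d = 0) →
    pvLoopA p (ds.flatMap fun d => List.replicate (wl.count d) d) price (pvSem f wl)
      = pvSem (pvGreedy p wl ds price f) wl := by
  intro ds
  induction ds with
  | nil => intro price f hp _ _; simp [pvLoopA, pvGreedy]
  | cons d ds ih =>
    intro price f hp hnd hf0
    have hfd : f d = 0 := hf0 d (by simp)
    have hdds : d ∉ ds := (List.nodup_cons.mp hnd).1
    rw [List.flatMap_cons, pvLoopA_replicate p d _ (wl.count d) price _ hp]
    have hgre : pvGreedy p wl (d :: ds) price f
        = pvGreedy p wl ds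
            (price - (((if 0 < pvVal d then min (wl.count d) (pvNeed p price (pvVal d)).toNat
                       else wl.count d : Nat)) : Int) * pvVal d)
            (Function.update f d
              (if 0 < pvVal d then min (wl.count d) (pvNeed p price (pvVal d)).toNat
               else wl.count d)) := by
      simp only [pvGreedy]
      rw [if_neg (not_le.mpr hp)]
    rw [hgre]
    by_cases hcond : 0 < pvVal d ∧ (pvNeed p price (pvVal d)).toNat ≤ wl.count d
    · obtain ⟨hv, hle⟩ := hcond
      rw [if_pos ⟨hv, hle⟩]
      have ht : (if 0 < pvVal d then min (wl.count d) (pvNeed p price (pvVal d)).toNat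
          else wl.count d) = (pvNeed p price (pvVal d)).toNat := by
        rw [if_pos hv]; omega
      rw [ht]
      have hpos := pvNeed_pos hv hp
      have hcast : (((pvNeed p price (pvVal d)).toNat : Int)) = pvNeed p price (pvVal d) :=
        Int.toNat_of_nonneg (by omega)
      have hple : price - ((pvNeed p price (pvVal d)).toNat : Int) * pvVal d ≤ p := by
        rw [hcast]
        exact (pvNeed_le_iff hv (pvNeed p price (pvVal d))).mp le_rfl
      rw [pvGreedy_of_le _ _ _ _ _ hple, pvRemoveN_sem, hfd]
      norm_num
    · rw [if_neg hcond]
      have ht : (if 0 < pvVal d then min (wl.count d) (pvNeed p price (pvVal d)).toNat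
          else wl.count d) = wl.count d := by
        by_cases hv : 0 < pvVal d
        · rw [if_pos hv]
          have : ¬ (pvNeed p price (pvVal d)).toNat ≤ wl.count d := fun h => hcond ⟨hv, h⟩
          omega
        · rw [if_neg hv]
      rw [ht]
      have hp' : p < price - (wl.count d : Int) * pvVal d := by
        by_cases hv : 0 < pvVal d
        · have hnle : ¬ (pvNeed p price (pvVal d)).toNat ≤ wl.count d := fun h => hcond ⟨hv, h⟩
          have hpos := pvNeed_pos hv hp
          by_contra hcon
          have h1 : pvNeed p price (pvVal d) ≤ (wl.count d : Int) :=
            (pvNeed_le_iff hv _).mpr (by omega)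
          omega
        · have hv0 : pvVal d ≤ 0 := by omega
          have : (wl.count d : Int) * pvVal d ≤ 0 :=
            mul_nonpos_of_nonneg_of_nonpos (by positivity) hv0
          omega
      have hup : ∀ e ∈ ds, Function.update f d (wl.count d) e = 0 := by
        intro e he
        rw [Function.update_of_ne (fun h => hdds (by rw [← h]; exact he))]
        exact hf0 e (List.mem_cons_of_mem _ he)
      rw [pvRemoveN_sem, hfd, Nat.zero_add]
      exact ih _ _ hp' (List.nodup_cons.mp hnd).2 hup

lemma pvCount_flatMap_replicate (g : Char → Nat) (c : Char) : ∀ ds : List Char, ds.Nodup →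
    (ds.flatMap fun d => List.replicate (g d) d).count c = if c ∈ ds then g c else 0 := by
  intro ds
  induction ds with
  | nil => intro _; simp
  | cons d ds ih =>
    intro hnd
    rcases List.nodup_cons.mp hnd with ⟨hd, hnd'⟩
    rw [List.flatMap_cons, List.count_append, ih hnd', List.count_replicate]
    by_cases hc : c = d
    · subst hc
      simp [hd]
    · simp [hc, Ne.symm hc, List.mem_cons]

lemma pvPairwise_flatMap_replicate {R : Char → Char → Prop} (hrefl : ∀ d, R d d) (g : Char → Nat) :
    ∀ ds : List Char, ds.Pairwise R → (ds.flatMap fun d => List.replicate (g d) d).Pairwise R := by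
  intro ds
  induction ds with
  | nil => intro _; simp
  | cons d ds ih =>
    intro hpw
    rcases List.pairwise_cons.mp hpw with ⟨hd, hpw'⟩
    rw [List.flatMap_cons]
    refine List.pairwise_append.mpr ⟨List.pairwise_replicate.mpr (by tauto), ih hpw', ?_⟩
    intro a ha b hb
    rcases List.mem_flatMap.mp hb with ⟨d', hd', hb'⟩
    rw [List.eq_of_mem_replicate ha, List.eq_of_mem_replicate hb']
    exact hd d' hd'

-- the sorted string is the concatenation of the per-character blocks, in descending character order
lemma pvGroup_decomp (wl : List Char) :
    PySem.List.sorted wl (fun c => c.toNat) true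
      = (PySem.List.sorted (PySem.Set.ofList wl) (fun c => c) true).flatMap
          (fun d => List.replicate (wl.count d) d) := by
  have hnd : (PySem.List.sorted (PySem.Set.ofList wl) (fun c => c) true).Nodup := by
    have h : (PySem.List.sorted (PySem.Set.ofList wl) (fun c : Char => c) true).Perm
        (PySem.Set.ofList wl) := PySem.List.sorted_perm _ _ _
    exact h.symm.nodup (PySem.Set.nodup_ofList wl)
  have hmem : ∀ c, c ∈ PySem.List.sorted (PySem.Set.ofList wl) (fun c : Char => c) true ↔ c ∈ wl := by
    intro c
    rw [PySem.List.mem_sorted, PySem.Set.mem_ofList]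
  have hperm2 : ((PySem.List.sorted (PySem.Set.ofList wl) (fun c : Char => c) true).flatMap
      (fun d => List.replicate (wl.count d) d)).Perm wl := by
    rw [List.perm_iff_count]
    intro c
    rw [pvCount_flatMap_replicate _ _ _ hnd]
    by_cases hc : c ∈ wl
    · rw [if_pos ((hmem c).mpr hc)]
    · rw [if_neg (fun h => hc ((hmem c).mp h)), eq_comm, List.count_eq_zero]
      exact hc
  refine PySem.List.eq_of_perm_of_pairwise_le_of_injective (fun c : Char => -(c.toNat : Int))
    ?_ ((PySem.List.sorted_perm wl (fun c => c.toNat) true).trans hperm2.symm) ?_ ?_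
  · intro a b h
    have h2 : a.toNat = b.toNat := by
      dsimp only at h
      omega
    exact Char.ext (UInt32.toNat_inj.mp h2)
  · exact (PySem.List.sorted_pairwise_rev wl (fun c => c.toNat)).imp
      (by intro a b h; dsimp only at h ⊢; omega)
  · have hds : (PySem.List.sorted (PySem.Set.ofList wl) (fun c : Char => c) true).Pairwise
        (fun a b : Char => -((a.toNat : Int)) ≤ -((b.toNat : Int))) := by
      refine (PySem.List.sorted_pairwise_rev (PySem.Set.ofList wl) (fun c : Char => c)).imp ?_
      intro a b h
      have h2 : b.toNat ≤ a.toNat := Fin.mk_le_mk.mp h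
      omega
    exact pvPairwise_flatMap_replicate
      (R := fun a b : Char => -((a.toNat : Int)) ≤ -((b.toNat : Int)))
      (fun d => le_refl _) _ _ hds

-- B's rebuild pass is pvSem of the final removal dict
lemma pvRebuild_eq_sem : ∀ (wl : List Char) (rem : PySem.Dict Char Int) (acc : List Char),
    (wl.foldl
      (fun (st : PySem.Dict Char Int × List Char) c =>
        let r := st.1.getD c 0
        if 0 < r then (st.1.insert c (r - 1), st.2) else (st.1, st.2 ++ [c]))
      (rem, acc)).2 = acc ++ pvSem (fun c => (rem.getD c 0).toNat) wl := by
  intro wl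
  induction wl with
  | nil => intro rem acc; simp [pvSem]
  | cons x xs ih =>
    intro rem acc
    rw [List.foldl_cons]
    dsimp only
    by_cases hr : 0 < rem.getD x 0
    · rw [if_pos hr, ih]
      have hsem : pvSem (fun c => (rem.getD c 0).toNat) (x :: xs)
          = pvSem (fun c => ((rem.insert x (rem.getD x 0 - 1)).getD c 0).toNat) xs := by
        have hx : 0 < (rem.getD x 0).toNat := by omega
        simp only [pvSem, hx, if_pos]
        congr 1
        funext c
        by_cases hc : c = x
        · subst hc
          rw [Function.update_self, PySem.Dict.getD_insert, if_pos rfl]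
          omega
        · rw [Function.update_of_ne hc, PySem.Dict.getD_insert, if_neg hc]
      rw [hsem]
    · rw [if_neg hr, ih]
      have hsem : pvSem (fun c => (rem.getD c 0).toNat) (x :: xs)
          = x :: pvSem (fun c => (rem.getD c 0).toNat) xs := by
        have hx : ¬ 0 < (rem.getD x 0).toNat := by omega
        simp [pvSem, hx]
      rw [hsem]
      simp

-- B's dict-building loop computes pvGreedy, read through getD
lemma pvLoopB_eq_greedy (p : Int) (wl : List Char) : ∀ (ds : List Char) (price : Int)
    (rem : PySem.Dict Char Int) (f : Char → Nat), (∀ c, rem.getD c 0 = (f c : Int)) →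
    ∀ c, (pvLoopB p (PySem.Dict.counter wl) ds price rem).getD c 0 = ((pvGreedy p wl ds price f) c : Int) := by
  intro ds
  induction ds with
  | nil => intro price rem f hcor c; simpa [pvLoopB, pvGreedy] using hcor c
  | cons d ds ih =>
    intro price rem f hcor c
    by_cases hp : price ≤ p
    · simpa [pvLoopB, pvGreedy, hp] using hcor c
    · have hplt : p < price := lt_of_not_ge hp
      have hn : (PySem.Dict.counter wl).getD d 0 = (wl.count d : Int) :=
        PySem.Dict.getD_counter wl d
      have hstepB : pvLoopB p (PySem.Dict.counter wl) (d :: ds) price rem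
          = pvLoopB p (PySem.Dict.counter wl) ds
              (price - (if 0 < pvVal d then
                  (if pvNeed p price (pvVal d) < (wl.count d : Int)
                   then pvNeed p price (pvVal d) else (wl.count d : Int))
                 else (wl.count d : Int)) * pvVal d)
              (rem.insert d
                (if 0 < pvVal d then
                  (if pvNeed p price (pvVal d) < (wl.count d : Int)
                   then pvNeed p price (pvVal d) else (wl.count d : Int))
                 else (wl.count d : Int))) := by
        simp only [pvLoopB]
        rw [if_neg hp, hn]
        rfl
      have hstepG : pvGreedy p wl (d :: ds) price f
          = pvGreedy p wl ds
              (price - (((if 0 < pvVal d then min (wl.count d) (pvNeed p price (pvVal d)).toNat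
                         else wl.count d : Nat)) : Int) * pvVal d)
              (Function.update f d
                (if 0 < pvVal d then min (wl.count d) (pvNeed p price (pvVal d)).toNat
                 else wl.count d)) := by
        simp only [pvGreedy]
        rw [if_neg hp]
      have htake : (if 0 < pvVal d then
            (if pvNeed p price (pvVal d) < (wl.count d : Int)
             then pvNeed p price (pvVal d) else (wl.count d : Int))
           else (wl.count d : Int))
          = (((if 0 < pvVal d then min (wl.count d) (pvNeed p price (pvVal d)).toNat
               else wl.count d : Nat)) : Int) := by
        by_cases hv : 0 < pvVal d
        · have hpos := pvNeed_pos hv hplt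
          rw [if_pos hv, if_pos hv]
          push_cast
          split_ifs with h1 <;> omega
        · rw [if_neg hv, if_neg hv]
      rw [hstepB, hstepG, htake]
      refine ih _ _ _ ?_ c
      intro e
      rw [PySem.Dict.getD_insert]
      by_cases he : e = d
      · subst he
        rw [if_pos rfl, Function.update_self]
      · rw [if_neg he, Function.update_of_ne he]
        exact hcor e

-- ===== VERDICT (by name: the statement is the Claim_ definition above) =====
theorem reduce_string_by_price_spec : Claim_equal_reduce_string_by_price := by
  intro w p _
  unfold Spec_reduce_string_by_price reduce_string_by_price reduce_string_by_price_alt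
  by_cases h : (w.toList.map (fun c => (c.toNat : Int) - 96)).sum ≤ p
  · rw [if_pos h, if_pos h]
  · simp only [if_neg h]
    have hplt : p < (w.toList.map (fun c => (c.toNat : Int) - 96)).sum := lt_of_not_ge h
    have hnd : (PySem.List.sorted (PySem.Set.ofList w.toList) (fun c : Char => c) true).Nodup := by
      have hpm : (PySem.List.sorted (PySem.Set.ofList w.toList) (fun c : Char => c) true).Perm
          (PySem.Set.ofList w.toList) := PySem.List.sorted_perm _ _ _
      exact hpm.symm.nodup (PySem.Set.nodup_ofList w.toList)
    have hM := pvMaster p w.toList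
      (PySem.List.sorted (PySem.Set.ofList w.toList) (fun c : Char => c) true)
      ((w.toList.map (fun c => (c.toNat : Int) - 96)).sum) (fun _ => 0) hplt hnd (fun _ _ => rfl)
    rw [pvSem_zero] at hM
    rw [PySem.Dict.foldl_insert_getD_add_one_eq_counter, PySem.Dict.keys_counter,
        pvRebuild_eq_sem, List.nil_append, pvGroup_decomp, hM]
    congr 1
    congr 1
    funext c
    rw [pvLoopB_eq_greedy p w.toList _ _ _ (fun _ => 0)
      (fun e => by rw [PySem.Dict.getD_empty]; rfl) c, Int.toNat_natCast]
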